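-- pv_equiv track=rewrite | github.com/krzemienski/awesome-researcher | awesome_list_researcher/validator.py | _needs_description_improvement
-- ===== SOURCE A (Python) =====
-- def _needs_description_improvement(description: str) -> bool:
--     """
--     Check if a description needs improvement.
--
--     Args:
--         description: Description to check
--
--     Returns:
--         True if the description needs improvement
--     """
--     # Check for promotional language
--     promotional_words = [
--         "best", "amazing", "awesome", "incredible", "excellent",
--         "outstanding", "superior", "fantastic", "greatest",
--         "perfect", "ultimate", "unbelievable", "magnificent"
--     ]
--
--     # Convert description to lowercase for case-insensitive matching
--     lower_desc = description.lower()
--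
--     for word in promotional_words:
--         if f" {word} " in f" {lower_desc} ":
--             return True
--
--     # Check for exclamation marks
--     if "!" in description:
--         return True
--
--     return False
-- ===== SOURCE B (Python) =====
-- PROMOTIONAL_WORDS = frozenset({
--     "best", "amazing", "awesome", "incredible", "excellent",
--     "outstanding", "superior", "fantastic", "greatest",
--     "perfect", "ultimate", "unbelievable", "magnificent"
-- })
--
--
-- def _needs_description_improvement(description: str) -> bool:
--     """Single pass: tokenize on single spaces while scanning and test each
--     token against a set of promotional words; also flag exclamation marks."""
--     if "!" in description:
--         return True
--     token = []
--     for ch in description.lower():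
--         if ch == " ":
--             if "".join(token) in PROMOTIONAL_WORDS:
--                 return True
--             token = []
--         else:
--             token.append(ch)
--     return "".join(token) in PROMOTIONAL_WORDS
-- ===== Notes on version B (the rewrite author's own statement) =====
-- stated objective: alternative
-- what changed: replaces the 13 padded-substring searches over the whole string with one left-to-right scan that accumulates space-delimited tokens and tests each completed token for membership in a set of promotional words
import Mathlib
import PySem

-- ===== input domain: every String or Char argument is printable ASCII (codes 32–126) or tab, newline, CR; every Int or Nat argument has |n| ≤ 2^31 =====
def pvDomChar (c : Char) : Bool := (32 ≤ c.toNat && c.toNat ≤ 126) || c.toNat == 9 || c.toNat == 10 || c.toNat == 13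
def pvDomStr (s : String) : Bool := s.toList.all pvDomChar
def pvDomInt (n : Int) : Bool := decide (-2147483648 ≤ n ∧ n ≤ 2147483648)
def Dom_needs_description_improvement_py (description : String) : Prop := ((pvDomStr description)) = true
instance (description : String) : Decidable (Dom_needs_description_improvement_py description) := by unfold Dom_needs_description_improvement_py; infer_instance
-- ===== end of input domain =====

-- B replaces A's 13 padded-substring searches by a single scan that collects
-- space-delimited tokens and tests each against the set of promotional words
-- (objective: alternative).

-- ===== PORT A =====
-- the promotional_words list of A
def pvPromoWordsA : List String :=
  ["best", "amazing", "awesome", "incredible", "excellent",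
   "outstanding", "superior", "fantastic", "greatest",
   "perfect", "ultimate", "unbelievable", "magnificent"]

-- A's 'for word in promotional_words: if f" {word} " in f" {lower_desc} ": return True'
def pvWordLoopA : List String → String → Bool
  | [], _ => false
  | w :: ws, d =>
    if PySem.Str.isIn (" " ++ w ++ " ") (" " ++ d ++ " ") then true
    else pvWordLoopA ws d

def needs_description_improvement_py (description : String) : Bool :=
  let lower_desc := PySem.Str.lower description
  if pvWordLoopA pvPromoWordsA lower_desc then true
  else if PySem.Str.isIn "!" description then true
  else false

-- ===== PORT B =====
-- the frozenset of promotional words of B, as distinct char lists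
def pvPromoSetB : List (List Char) :=
  ["best", "amazing", "awesome", "incredible", "excellent",
   "outstanding", "superior", "fantastic", "greatest",
   "perfect", "ultimate", "unbelievable", "magnificent"].map String.toList

-- B's 'for ch in description.lower(): …' scan with the running token
def pvScanB : List Char → List Char → Bool
  | [], token => pvPromoSetB.contains token
  | c :: rest, token =>
    if c = ' ' then
      if pvPromoSetB.contains token then true else pvScanB rest []
    else pvScanB rest (token ++ [c])

def needs_description_improvement_py_alt (description : String) : Bool :=
  if PySem.Str.isIn "!" description then true
  else pvScanB (PySem.Str.lower description).toList []

-- ===== PRECONDITION & SPEC =====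
def Spec_needs_description_improvement_py (description : String) (out : Bool) : Prop := out = needs_description_improvement_py_alt description
instance (description : String) (out : Bool) : Decidable (Spec_needs_description_improvement_py description out) := by unfold Spec_needs_description_improvement_py; infer_instance

-- ===== CLAIM (what is proved, stated in full; the proofs are below) =====
def Claim_equal_needs_description_improvement_py : Prop := ∀ (description : String), Dom_needs_description_improvement_py description → Spec_needs_description_improvement_py description (needs_description_improvement_py description)

-- ===== LEMMAS AND PROOFS =====

-- the Bool shape of A's early-return chain versus B's or
theorem pv_iftail (x y : Bool) :
    (if x = true then true else if y = true then true else false) = (if y = true then true else x) := by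
  cases x <;> cases y <;> simp

-- an infix starting with ' ' ignores a space-free left context
theorem pv_drop_ctx {c r u : List Char} (hc : ' ' ∉ c) (hu : u.head? = some ' ') :
    u <:+: (c ++ r) ↔ u <:+: r := by
  induction c with
  | nil => simp
  | cons b c ih =>
    rw [List.cons_append, List.infix_cons_iff]
    constructor
    · rintro (hp | hi)
      · exfalso
        cases u with
        | nil => simp at hu
        | cons x u' =>
          obtain rfl : x = ' ' := by simpa using hu
          have : b = ' ' := (List.cons_prefix_cons.mp hp).1.symm
          exact hc (by simp [this])
      · exact (ih (fun h => hc (List.mem_cons_of_mem _ h))).mp hi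
    · intro h
      exact Or.inr ((ih (fun h' => hc (List.mem_cons_of_mem _ h'))).mpr h)

-- prefix up to the first space of two space-free words
theorem pv_prefix_tok {w c tl d : List Char} (hw : ' ' ∉ w) (hc : ' ' ∉ c) :
    (w ++ ' ' :: tl) <+: (c ++ ' ' :: d) ↔ w = c ∧ tl <+: d := by
  induction w generalizing c with
  | nil =>
    cases c with
    | nil => simp
    | cons b c' =>
      simp only [List.nil_append, List.cons_append, List.cons_prefix_cons]
      constructor
      · rintro ⟨rfl, -⟩; exact absurd (by simp) hc
      · rintro ⟨h, -⟩; simp at h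
  | cons a w' ih =>
    cases c with
    | nil =>
      simp only [List.cons_append, List.nil_append, List.cons_prefix_cons]
      constructor
      · rintro ⟨rfl, -⟩; exact absurd (by simp) hw
      · rintro ⟨h, -⟩; simp at h
    | cons b c' =>
      simp only [List.cons_append, List.cons_prefix_cons]
      have hw' : ' ' ∉ w' := fun h => hw (List.mem_cons_of_mem _ h)
      have hc' : ' ' ∉ c' := fun h => hc (List.mem_cons_of_mem _ h)
      rw [ih hw' hc']
      constructor
      · rintro ⟨rfl, rfl, h⟩; exact ⟨rfl, h⟩
      · rintro ⟨h, htl⟩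
        obtain ⟨rfl, rfl⟩ : a = b ∧ w' = c' := by simpa using h
        exact ⟨rfl, rfl, htl⟩

-- " w " occurs in " c " (both space-free) iff w = c
theorem pv_tok_eq {w c : List Char} (hw : ' ' ∉ w) (hc : ' ' ∉ c) :
    (' ' :: (w ++ [' '])) <:+: (' ' :: (c ++ [' '])) ↔ w = c := by
  rw [List.infix_cons_iff]
  constructor
  · rintro (hp | hi)
    · have := List.cons_prefix_cons.mp hp
      exact ((pv_prefix_tok hw hc).mp this.2).1
    · have := (pv_drop_ctx hc (by simp)).mp hi
      have hlen := this.length_le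
      simp at hlen
  · rintro rfl
    exact Or.inl (by simp)

-- one space step: " w " in " c<space>r " iff w = c or " w " in " r "
theorem pv_tok_step {w c r : List Char} (hw : ' ' ∉ w) (hc : ' ' ∉ c) :
    (' ' :: (w ++ [' '])) <:+: (' ' :: ((c ++ ' ' :: r) ++ [' '])) ↔
      w = c ∨ (' ' :: (w ++ [' '])) <:+: (' ' :: (r ++ [' '])) := by
  have harr : (c ++ ' ' :: r) ++ [' '] = c ++ ' ' :: (r ++ [' ']) := by simp
  rw [harr, List.infix_cons_iff]
  constructor
  · rintro (hp | hi)
    · have := List.cons_prefix_cons.mp hp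
      exact Or.inl ((pv_prefix_tok hw hc).mp this.2).1
    · exact Or.inr ((pv_drop_ctx hc (by simp)).mp hi)
  · rintro (rfl | hi)
    · exact Or.inl (by simp)
    · exact Or.inr ((pv_drop_ctx hc (by simp)).mpr hi)

theorem pv_promo_space_free : ∀ w ∈ pvPromoSetB, ' ' ∉ w := by decide

-- any over a list only depends on the function's values on members
theorem pv_any_congr_mem {α : Type} {l : List α} {p q : α → Bool}
    (h : ∀ a ∈ l, p a = q a) : l.any p = l.any q := by
  induction l with
  | nil => rfl
  | cons a l ih =>
    simp only [List.any_cons, h a (by simp), ih (fun b hb => h b (List.mem_cons_of_mem _ hb))]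

-- the scan invariant: pvScanB finds a promotional token of token ++ l iff one of
-- the padded words occurs in the padded remainder
theorem pv_scan_inv (l : List Char) (token : List Char) (htok : ' ' ∉ token) :
    pvScanB l token =
      pvPromoSetB.any (fun w => decide ((' ' :: (w ++ [' '])) <:+: (' ' :: ((token ++ l) ++ [' '])))) := by
  induction l generalizing token with
  | nil =>
    simp only [pvScanB, List.append_nil]
    rw [List.contains_eq_any_beq]
    refine pv_any_congr_mem (fun w hw => ?_)
    have := pv_tok_eq (pv_promo_space_free w hw) htok
    simp only [this]
    by_cases h : w = token
    · subst h; simp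
    · have h2 : ¬ token = w := fun hh => h hh.symm
      simp [h, h2]
  | cons c rest ih =>
    by_cases hcs : c = ' '
    · subst hcs
      have hstep : pvScanB (' ' :: rest) token
          = (pvPromoSetB.contains token || pvScanB rest []) := by
        simp [pvScanB]
      rw [hstep]
      have hrhs : ∀ w ∈ pvPromoSetB,
          decide ((' ' :: (w ++ [' '])) <:+: (' ' :: ((token ++ ' ' :: rest) ++ [' '])))
            = (decide (w = token) || decide ((' ' :: (w ++ [' '])) <:+: (' ' :: (rest ++ [' '])))) := by
        intro w hw
        have hval := pv_tok_step (r := rest) (pv_promo_space_free w hw) htok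
        simp only [hval]
        simp
      rw [pv_any_congr_mem hrhs]
      by_cases hmem : token ∈ pvPromoSetB
      · have h1 : pvPromoSetB.contains token = true := by simpa using hmem
        rw [h1, Bool.true_or]
        symm
        rw [List.any_eq_true]
        exact ⟨token, hmem, by simp⟩
      · have h1 : pvPromoSetB.contains token = false := by simpa using hmem
        rw [h1, Bool.false_or, ih [] (by simp)]
        simp only [List.nil_append]
        symm
        refine pv_any_congr_mem (fun w hw => ?_)
        have hne : w ≠ token := fun h => hmem (h ▸ hw)
        simp [hne]
    · simp only [pvScanB, if_neg hcs]
      have htok' : ' ' ∉ token ++ [c] := by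
        intro h
        rcases List.mem_append.mp h with h | h
        · exact htok h
        · exact hcs (Eq.symm (by simpa using h))
      rw [ih (token ++ [c]) htok']
      have : (token ++ [c]) ++ rest = token ++ c :: rest := by simp
      rw [this]

-- A's word loop is an any over the list
theorem pv_wordLoopA_eq_any (ws : List String) (d : String) :
    pvWordLoopA ws d = ws.any (fun w => PySem.Str.isIn (" " ++ w ++ " ") (" " ++ d ++ " ")) := by
  induction ws with
  | nil => rfl
  | cons w ws ih =>
    simp only [pvWordLoopA, List.any_cons]
    simp [ih]

-- the padded Str membership test, read on char lists
theorem pv_isIn_pad (w d : String) :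
    PySem.Str.isIn (" " ++ w ++ " ") (" " ++ d ++ " ")
      = decide ((' ' :: (w.toList ++ [' '])) <:+: (' ' :: (d.toList ++ [' ']))) := by
  by_cases h : (' ' :: (w.toList ++ [' '])) <:+: (' ' :: (d.toList ++ [' ']))
  · rw [decide_eq_true h]
    rw [PySem.Str.isIn_iff_infix]
    simpa using h
  · rw [decide_eq_false h]
    rw [← Bool.not_eq_true, PySem.Str.isIn_iff_infix]
    simpa using h

-- ===== VERDICT (by name: the statement is the Claim_ definition above) =====
theorem needs_description_improvement_py_spec : Claim_equal_needs_description_improvement_py := by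
  intro description _
  unfold Spec_needs_description_improvement_py
  simp only [needs_description_improvement_py, needs_description_improvement_py_alt]
  rw [pv_wordLoopA_eq_any]
  rw [pv_scan_inv _ [] (by simp)]
  simp only [List.nil_append]
  have hany : (pvPromoWordsA.any
      (fun w => PySem.Str.isIn (" " ++ w ++ " ") (" " ++ PySem.Str.lower description ++ " ")))
      = pvPromoSetB.any (fun w => decide ((' ' :: (w ++ [' '])) <:+:
          (' ' :: ((PySem.Str.lower description).toList ++ [' '])))) := by
    have hset : pvPromoSetB = pvPromoWordsA.map String.toList := rfl
    rw [hset, List.any_map]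
    exact pv_any_congr_mem (fun w _ => pv_isIn_pad w (PySem.Str.lower description))
  rw [hany]
  exact pv_iftail _ _
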